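-- pv_equiv track=rewrite | github.com/Lexxx42/Introduction_to_programming_languages | python_gb/seminars/seminar5/ex002.py | collector
-- ===== SOURCE A (Python) =====
-- def collector(second_list):
--     third_list = []
--     for i in range(len(second_list)):
--         value = second_list[i]
--         sublist_list = [value]
--         for k in range(i + 1, len(second_list)):
--             if second_list[k] > value:
--                 value = second_list[k]
--                 sublist_list.append(value)
--         if len(sublist_list) > 1:
--             third_list.append(sublist_list)
--     return third_list
-- ===== SOURCE B (Python) =====
-- def collector(second_list):
--     # Right-to-left single pass: maintain the increasing maxima chain of the
--     # current suffix; chain for one position left is v consed onto the chain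
--     # with its <= v prefix dropped (single pass; avoids A's per-index suffix rescans).
--     result = []
--     chain = []
--     for v in reversed(second_list):
--         i = 0
--         while i < len(chain) and chain[i] <= v:
--             i += 1
--         chain = [v] + chain[i:]
--         if len(chain) > 1:
--             result.append(chain)
--     result.reverse()
--     return result
-- ===== Notes on version B (the rewrite author's own statement) =====
-- stated objective: alternative
-- what changed: Replaces A's per-index rescan of the whole suffix by a single right-to-left pass that maintains the current suffix's increasing maxima chain (each new chain is the value consed onto the previous chain with its <= prefix dropped).
import Mathlib
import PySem

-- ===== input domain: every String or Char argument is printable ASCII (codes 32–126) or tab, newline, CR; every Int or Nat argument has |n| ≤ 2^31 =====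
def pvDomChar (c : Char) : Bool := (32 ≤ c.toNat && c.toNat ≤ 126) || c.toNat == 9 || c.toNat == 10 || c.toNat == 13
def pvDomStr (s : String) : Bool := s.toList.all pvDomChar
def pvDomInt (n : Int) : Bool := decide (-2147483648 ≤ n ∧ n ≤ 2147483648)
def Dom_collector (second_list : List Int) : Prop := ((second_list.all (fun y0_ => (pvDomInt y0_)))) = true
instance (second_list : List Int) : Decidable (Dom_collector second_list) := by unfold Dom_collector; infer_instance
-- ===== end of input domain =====

-- B replaces A's per-index rescans of the suffix by one right-to-left pass that
-- maintains the current suffix's maxima chain (a different, single-pass algorithm).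

-- ===== PORT A =====
def collector (second_list : List Int) : List (List Int) :=
  (PySem.List.pyRange 0 (second_list.length : Int) 1).foldl
    (fun third i =>
      let value := PySem.List.pyGetD second_list i 0
      let st := (PySem.List.pyRange (i + 1) (second_list.length : Int) 1).foldl
        (fun (st : Int × List Int) k =>
          if PySem.List.pyGetD second_list k 0 > st.1
          then (PySem.List.pyGetD second_list k 0, st.2 ++ [PySem.List.pyGetD second_list k 0])
          else st)
        (value, [value])
      if st.2.length > 1 then third ++ [st.2] else third)
    []

-- ===== PORT B =====
-- B's inner 'while i < len(chain) and chain[i] <= v' prefix drop, ported structurally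
def dropLe (v : Int) : List Int → List Int
  | [] => []
  | x :: rest => if x ≤ v then dropLe v rest else x :: rest

def collector_alt (second_list : List Int) : List (List Int) :=
  let st := second_list.reverse.foldl
    (fun (st : List (List Int) × List Int) v =>
      let chain := v :: dropLe v st.2
      (if chain.length > 1 then st.1 ++ [chain] else st.1, chain))
    ([], [])
  st.1.reverse

-- ===== PRECONDITION & SPEC =====
def Spec_collector (second_list : List Int) (out : List (List Int)) : Prop := out = collector_alt second_list
instance (second_list : List Int) (out : List (List Int)) : Decidable (Spec_collector second_list out) := by unfold Spec_collector; infer_instance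

-- ===== CLAIM (what is proved, stated in full; the proofs are below) =====
def Claim_equal_collector : Prop := ∀ (second_list : List Int), Dom_collector second_list → Spec_collector second_list (collector second_list)

-- ===== LEMMAS AND PROOFS =====

-- strict left-to-right maxima chain of s above the running maximum v
def chainC (v : Int) : List Int → List Int
  | [] => []
  | x :: s => if x > v then x :: chainC x s else chainC v s

-- running maximum (first component of A's inner-loop state)
def maxC (v : Int) : List Int → Int
  | [] => v
  | x :: s => if x > v then maxC x s else maxC v s

-- the common specification: per starting index, the chain if it is nontrivial
def emit : List Int → List (List Int)
  | [] => []
  | x :: s => (if (x :: chainC x s).length > 1 then [x :: chainC x s] else []) ++ emit s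

lemma inner_fold (s : List Int) : ∀ (v : Int) (sl : List Int),
    s.foldl (fun (st : Int × List Int) y => if y > st.1 then (y, st.2 ++ [y]) else st) (v, sl)
      = (maxC v s, sl ++ chainC v s) := by
  induction s with
  | nil => intro v sl; simp [maxC, chainC]
  | cons x s ih =>
    intro v sl
    simp only [List.foldl_cons, maxC, chainC]
    by_cases h : x > v
    · simp [h, ih x (sl ++ [x])]
    · simp [h, ih v sl]

lemma A_gen (xs : List Int) : ∀ (pre : List Int) (acc : List (List Int)),
    (PySem.List.pyRange (pre.length : Int) (((pre ++ xs).length : Nat) : Int) 1).foldl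
      (fun third i =>
        let value := PySem.List.pyGetD (pre ++ xs) i 0
        let st := (PySem.List.pyRange (i + 1) (((pre ++ xs).length : Nat) : Int) 1).foldl
          (fun (st : Int × List Int) k =>
            if PySem.List.pyGetD (pre ++ xs) k 0 > st.1
            then (PySem.List.pyGetD (pre ++ xs) k 0, st.2 ++ [PySem.List.pyGetD (pre ++ xs) k 0])
            else st)
          (value, [value])
        if st.2.length > 1 then third ++ [st.2] else third)
      acc = acc ++ emit xs := by
  induction xs with
  | nil =>
    intro pre acc
    rw [PySem.List.pyRange_one_eq_nil (by simp)]
    simp [emit]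
  | cons x s ih =>
    intro pre acc
    have hlt : (pre.length : Int) < (((pre ++ x :: s).length : Nat) : Int) := by
      simp
    rw [PySem.List.pyRange_one_cons hlt]
    simp only [List.foldl_cons]
    -- evaluate the i = pre.length step
    have hval : PySem.List.pyGetD (pre ++ x :: s) (pre.length : Int) 0 = x := by
      simp [PySem.List.pyGetD_natCast]
    have hinner :
        (PySem.List.pyRange ((pre.length : Int) + 1) (((pre ++ x :: s).length : Nat) : Int) 1).foldl
          (fun (st : Int × List Int) k =>
            if PySem.List.pyGetD (pre ++ x :: s) k 0 > st.1
            then (PySem.List.pyGetD (pre ++ x :: s) k 0, st.2 ++ [PySem.List.pyGetD (pre ++ x :: s) k 0])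
            else st)
          (x, [x]) = (maxC x s, x :: chainC x s) := by
      have := PySem.List.foldl_pyRange_pyGetD' (pre ++ x :: s) 0
        (fun (st : Int × List Int) (y : Int) => if y > st.1 then (y, st.2 ++ [y]) else st)
        ((x, [x]) : Int × List Int) (a := (pre.length : Int) + 1) (by positivity)
      rw [this]
      have hdrop : (pre ++ x :: s).drop (((pre.length : Int) + 1)).toNat = s := by
        have : (((pre.length : Int) + 1)).toNat = (pre ++ [x]).length := by simp
        rw [this, show pre ++ x :: s = (pre ++ [x]) ++ s by simp, List.drop_left]
      rw [hdrop, inner_fold s x [x]]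
      simp
    rw [hval, hinner]
    have ihx := ih (pre ++ [x])
      (if (x :: chainC x s).length > 1 then acc ++ [x :: chainC x s] else acc)
    rw [show (pre ++ [x]) ++ s = pre ++ x :: s by simp] at ihx
    simp only [List.length_append, List.length_cons, List.length_nil, Nat.zero_add] at ihx ⊢
    rw [show ((pre.length : Int) + 1) = ((pre.length + 1 : Nat) : Int) by push_cast; ring]
    rw [show (pre.length + (s.length + 1)) = (pre.length + 1 + s.length) by omega] at ihx ⊢
    refine ihx.trans ?_
    simp only [emit]
    split_ifs <;> simp_all

def Ch : List Int → List Int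
  | [] => []
  | x :: s => x :: dropLe x (Ch s)

lemma dropLe_chainC (s : List Int) : ∀ (y v : Int), y ≤ v → dropLe v (chainC y s) = chainC v s := by
  induction s with
  | nil => intro y v _; simp [chainC, dropLe]
  | cons z t ih =>
    intro y v hyv
    simp only [chainC]
    by_cases hzy : z > y
    · simp only [hzy, if_pos, dropLe]
      by_cases hzv : z ≤ v
      · rw [if_pos hzv, ih z v hzv, if_neg (by omega)]
      · rw [if_neg hzv, if_pos (by omega)]
    · rw [if_neg hzy, ih y v hyv, if_neg (by omega)]

lemma dropLe_Ch (s : List Int) : ∀ (x : Int), dropLe x (Ch s) = chainC x s := by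
  induction s with
  | nil => intro x; simp [Ch, chainC, dropLe]
  | cons y t ih =>
    intro x
    simp only [Ch, chainC, dropLe]
    by_cases h : y ≤ x
    · rw [if_pos h, if_neg (by omega), ih y, dropLe_chainC t y x h]
    · rw [if_neg h, if_pos (by omega), ih y]

lemma B_gen (xs : List Int) : ∀ (res : List (List Int)),
    xs.reverse.foldl
      (fun (st : List (List Int) × List Int) v =>
        let chain := v :: dropLe v st.2
        (if chain.length > 1 then st.1 ++ [chain] else st.1, chain))
      (res, []) = (res ++ (emit xs).reverse, Ch xs) := by
  induction xs with
  | nil => intro res; simp [emit, Ch]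
  | cons x s ih =>
    intro res
    rw [List.reverse_cons, List.foldl_append, ih res]
    simp only [List.foldl_cons, List.foldl_nil, dropLe_Ch s x, Ch, emit]
    split_ifs <;> simp

lemma collector_alt_eq_emit (xs : List Int) : collector_alt xs = emit xs := by
  unfold collector_alt
  rw [B_gen xs []]
  simp

-- ===== VERDICT (by name: the statement is the Claim_ definition above) =====
theorem collector_spec : Claim_equal_collector := by
  intro xs _
  unfold Spec_collector
  rw [collector_alt_eq_emit]
  unfold collector
  have := A_gen xs [] []
  simpa using this
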